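-- pv_equiv track=rewrite | github.com/zelenDzu/Spelling-Bee | main.py | make_output_sample
-- ===== SOURCE A (Python) =====
-- def make_output_sample(sample, found_words):
--     new_sample = sample.copy()
--     if found_words:
--         last_str = 3
--         maxlen = len(max(found_words, key=len))
--         for i, word in enumerate(found_words):
--             if i!=0 and i%4==0:
--                 new_sample[last_str] += '\n'
--                 last_str += 1
--             another_word = f'{i+1}){word}'
--             new_sample[last_str] = new_sample[last_str][:-2] + f'{another_word:<{maxlen+4}}' + "  "
--
--         new_sample[last_str] += '\n'
--
--     return new_sample
-- ===== SOURCE B (Python) =====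
-- def make_output_sample(sample, found_words):
--     if not found_words:
--         return sample.copy()
--     maxlen = max(map(len, found_words))
--     rows = []
--     for c in range(0, len(found_words), 4):
--         body = ''.join(f'{j+1}){w}'.ljust(maxlen + 4)
--                        for j, w in enumerate(found_words[c:c+4], start=c))
--         rows.append(sample[3 + c//4][:-2] + body + '  \n')
--     return sample[:3] + rows + sample[3 + len(rows):]
-- ===== Notes on version B (the rewrite author's own statement) =====
-- stated objective: alternative
-- what changed: A walks all words with a stateful row cursor (last_str), an i%4 branch and per-word [:-2] re-stripping of the row being built; B instead splits found_words into chunks of 4 and emits one finished output row per chunk (sample[3+c//4][:-2] + joined padded entries + ' \n'), assembling the result as sample[:3] + rows + the untouched tail.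
import Mathlib
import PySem

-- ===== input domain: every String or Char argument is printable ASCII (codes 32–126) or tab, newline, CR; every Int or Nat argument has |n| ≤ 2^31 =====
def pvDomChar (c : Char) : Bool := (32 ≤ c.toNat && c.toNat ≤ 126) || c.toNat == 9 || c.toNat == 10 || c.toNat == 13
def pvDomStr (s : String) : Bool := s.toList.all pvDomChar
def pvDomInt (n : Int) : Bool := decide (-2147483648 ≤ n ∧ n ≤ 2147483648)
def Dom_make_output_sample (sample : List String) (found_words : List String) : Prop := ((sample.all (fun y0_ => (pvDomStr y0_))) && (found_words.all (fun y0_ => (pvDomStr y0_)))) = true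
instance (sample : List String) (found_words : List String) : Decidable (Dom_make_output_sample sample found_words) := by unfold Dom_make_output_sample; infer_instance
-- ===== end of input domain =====

-- B rebuilds the output by mapping one row per 4-word chunk instead of A's stateful row-cursor loop; objective: alternative decomposition (same cost).


-- ===== PORT A =====
-- f'{i+1}){word}' padded with spaces to width maxlen+4 (the f-string f'{another_word:<{maxlen+4}}'); this f-string occurs verbatim in both Pythons
def pvEntry (i : Int) (word : String) (maxlen : Int) : String :=
  let aw := PySem.Int.toStr (i + 1) ++ ")" ++ word
  aw ++ String.ofList (List.replicate (maxlen + 4 - (aw.toList.length : Int)).toNat ' ')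

-- A's 'for i, word in enumerate(found_words)' loop over the state (new_sample, last_str)
def pvLoopA (maxlen : Int) : List String → Int → List String → Nat → List String × Nat
  | [], _, ns, last => (ns, last)
  | word :: rest, i, ns, last =>
    let st := if i ≠ 0 ∧ PySem.Int.mod i 4 = 0 then
                (ns.set last (ns.getD last "" ++ "\n"), last + 1)
              else (ns, last)
    let ns' := st.1.set st.2
      (PySem.Str.slice (st.1.getD st.2 "") none (some (-2)) ++ pvEntry i word maxlen ++ "  ")
    pvLoopA maxlen rest (i + 1) ns' st.2

def make_output_sample (sample : List String) (found_words : List String) : List String :=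
  let new_sample := sample
  if found_words.isEmpty then new_sample
  else
    let maxlen := PySem.Str.len ((PySem.List.max? found_words PySem.Str.len).getD "")
    let p := pvLoopA maxlen found_words 0 new_sample 3
    p.1.set p.2 (p.1.getD p.2 "" ++ "\n")

-- ===== PORT B =====
-- one output row per chunk found_words[4c:4c+4]; r = row offset, j = global index of the chunk's first word
def pvRowsB (sample : List String) (maxlen : Int) : Nat → Int → List String → List String
  | _, _, [] => []
  | r, j, w :: rest =>
    (PySem.Str.slice (sample.getD (3 + r) "") none (some (-2)) ++
       PySem.Str.join "" ((PySem.List.enumerate (w :: rest.take 3) j).map (fun p => pvEntry p.1 p.2 maxlen)) ++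
       "  \n")
      :: pvRowsB sample maxlen (r + 1) (j + 4) (rest.drop 3)
  termination_by _ _ l => l.length
  decreasing_by simp

def make_output_sample_alt (sample : List String) (found_words : List String) : List String :=
  if found_words.isEmpty then sample
  else
    let maxlen := (PySem.List.max? (found_words.map PySem.Str.len) (fun x => x)).getD 0
    let rows := pvRowsB sample maxlen 0 0 found_words
    sample.take 3 ++ rows ++ sample.drop (3 + rows.length)

-- ===== PRECONDITION & SPEC =====
-- Pre_ excludes exactly the inputs where A raises IndexError: a nonempty found_words needs
-- rows 3 .. 3+(n-1)/4 of a sample that is too short (B raises the same IndexError there).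
def Pre_make_output_sample (sample : List String) (found_words : List String) : Prop :=
  found_words = [] ∨ 3 + (found_words.length - 1) / 4 < sample.length
instance (sample : List String) (found_words : List String) : Decidable (Pre_make_output_sample sample found_words) := by unfold Pre_make_output_sample; infer_instance

def pvWitness_make_output_sample : List String × List String :=
  (["Spelling", "Bee", "", "*  ", "*  "], ["cat", "toad", "ox", "hen", "eel"])

def Spec_make_output_sample (sample : List String) (found_words : List String) (out : List String) : Prop := out = make_output_sample_alt sample found_words
instance (sample : List String) (found_words : List String) (out : List String) : Decidable (Spec_make_output_sample sample found_words out) := by unfold Spec_make_output_sample; infer_instance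

-- ===== CLAIM (what is proved, stated in full; the proofs are below) =====
def Claim_equal_make_output_sample : Prop := ∀ (sample : List String) (found_words : List String), Dom_make_output_sample sample found_words → Pre_make_output_sample sample found_words → Spec_make_output_sample sample found_words (make_output_sample sample found_words)

-- ===== LEMMAS AND PROOFS =====

-- number of output rows a nonempty found_words occupies
def pvNRows (l : List String) : Nat := (l.length - 1) / 4 + 1

-- the final 'new_sample[last_str] += "\n"' applied to the loop's result state
def pvFinal (p : List String × Nat) : List String :=
  p.1.set p.2 (p.1.getD p.2 "" ++ "\n")

lemma pv_tl2 : ("  " : String).toList = [' ', ' '] := by decide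
lemma pv_tl2n : ("  \n" : String).toList = [' ', ' ', '\n'] := by decide
lemma pv_tln : ("\n" : String).toList = ['\n'] := by decide

lemma pv_strip2 (s : String) :
    PySem.Str.slice (s ++ "  ") none (some (-2)) = s := by
  rw [← String.toList_inj]
  simp [PySem.Str.toList_slice, pv_tl2, PySem.List.slice]

lemma pv_getD_set (ns : List String) (idx : Nat) (h : idx < ns.length) (v : String) :
    (ns.set idx v).getD idx "" = v := by
  simp [List.getD_eq_getElem?_getD, h]

lemma pv_getD_set_ne (ns : List String) (idx j : Nat) (h : idx ≠ j) (v : String) :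
    (ns.set idx v).getD j "" = ns.getD j "" := by
  simp [List.getD_eq_getElem?_getD, h]

-- collapse one mid-chunk write of A's loop
lemma pv_write (ns : List String) (idx : Nat) (h : idx < ns.length) (body e : String) :
    (ns.set idx (body ++ "  ")).set idx
      (PySem.Str.slice ((ns.set idx (body ++ "  ")).getD idx "") none (some (-2)) ++ e ++ "  ")
    = ns.set idx (body ++ e ++ "  ") := by
  rw [pv_getD_set ns idx h, pv_strip2, List.set_set]

lemma pv_finish (ns : List String) (idx : Nat) (h : idx < ns.length) (v : String) :
    pvFinal (ns.set idx v, idx) = ns.set idx (v ++ "\n") := by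
  unfold pvFinal
  simp only []
  rw [pv_getD_set ns idx h, List.set_set]

lemma pv_take_set (ns : List String) (i : Nat) (h : i < ns.length) (R : String) :
    (ns.set i R).take (i + 1) = ns.take i ++ [R] := by
  induction ns generalizing i with
  | nil => simp at h
  | cons x xs ihx =>
    cases i with
    | zero => simp
    | succ n =>
      simp only [List.set_cons_succ, List.take_succ_cons, List.cons_append]
      rw [ihx n (by simp at h; omega)]

lemma pv_drop_set (ns : List String) (i k : Nat) (h : i < k) (R : String) :
    (ns.set i R).drop k = ns.drop k := by
  rw [List.drop_set, if_pos h]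

lemma pv_rowsB_congr (maxlen : Int) :
    ∀ (m : Nat) (words : List String), words.length = m →
    ∀ (r : Nat) (j : Int) (ns ns' : List String),
    (∀ k : Nat, r ≤ k → ns'.getD (3 + k) "" = ns.getD (3 + k) "") →
    pvRowsB ns' maxlen r j words = pvRowsB ns maxlen r j words := by
  intro m
  induction m using Nat.strong_induction_on with
  | _ m ih =>
    intro words hm r j ns ns' h
    match words with
    | [] => simp [pvRowsB]
    | w :: rest =>
      rw [pvRowsB, pvRowsB]
      congr 1
      · rw [h r le_rfl]
      · exact ih (rest.drop 3).length (by simp [← hm]) _ rfl _ _ _ _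
          (fun k hk => h k (by omega))

lemma pv_rowsB_length (maxlen : Int) :
    ∀ (m : Nat) (words : List String), words.length = m → words ≠ [] →
    ∀ (ns : List String) (r : Nat) (j : Int),
    (pvRowsB ns maxlen r j words).length = pvNRows words := by
  intro m
  induction m using Nat.strong_induction_on with
  | _ m ih =>
    intro words hm hne ns r j
    match words with
    | [] => exact absurd rfl hne
    | w :: rest =>
      rw [pvRowsB]
      by_cases hr : rest.drop 3 = []
      · have h3 : rest.length ≤ 3 := by
          have := List.drop_eq_nil_iff.mp hr; omega
        simp [hr, pvRowsB, pvNRows]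
        omega
      · have h3 : 3 < rest.length := by
          by_contra hc
          exact hr (List.drop_eq_nil_iff.mpr (by omega))
        have := ih (rest.drop 3).length (by simp [← hm]) _ rfl hr ns (r + 1) (j + 4)
        simp only [List.length_cons, this, pvNRows, List.length_drop]
        omega

lemma pv_maxlen_eq (w : String) (ws : List String) :
    PySem.Str.len ((PySem.List.max? (w :: ws) PySem.Str.len).getD "") =
      (PySem.List.max? ((w :: ws).map PySem.Str.len) (fun x => x)).getD 0 := by
  rcases hmax : PySem.List.max? (w :: ws) PySem.Str.len with _ | m
  · exfalso
    rw [PySem.List.max?_eq_none_iff] at hmax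
    exact List.cons_ne_nil w ws hmax
  · have hm := PySem.List.max?_mem hmax
    have hmax' := PySem.List.max?_isMax hmax
    rw [List.map_cons, PySem.List.max?_id_cons]
    simp only [Option.getD_some]
    have h1 := PySem.List.le_foldl_max (ws.map PySem.Str.len) (PySem.Str.len w)
    have h2 := PySem.List.foldl_max_mem (ws.map PySem.Str.len) (PySem.Str.len w)
    apply le_antisymm
    · rcases List.mem_cons.mp hm with hm' | hm'
      · rw [hm']; exact h1.1
      · exact h1.2 _ (List.mem_map_of_mem hm')
    · rcases h2 with h2 | h2
      · rw [h2]; exact hmax' w List.mem_cons_self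
      · obtain ⟨y, hy, hyl⟩ := List.mem_map.mp h2
        rw [← hyl]; exact hmax' y (List.mem_cons_of_mem _ hy)

set_option maxHeartbeats 2000000 in
lemma pv_main (maxlen : Int) :
    ∀ (m : Nat) (w : String) (rest : List String) (c : Nat) (ns : List String),
    (w :: rest).length = m →
    3 + c + pvNRows (w :: rest) ≤ ns.length →
    pvFinal (pvLoopA maxlen rest (4 * (c : Int) + 1)
        (ns.set (3 + c)
          (PySem.Str.slice (ns.getD (3 + c) "") none (some (-2)) ++
            pvEntry (4 * (c : Int)) w maxlen ++ "  ")) (3 + c))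
      = ns.take (3 + c) ++ pvRowsB ns maxlen c (4 * (c : Int)) (w :: rest) ++
          ns.drop (3 + c + pvNRows (w :: rest)) := by
  intro m
  induction m using Nat.strong_induction_on with
  | _ m ih =>
    intro w rest c ns hm hlen
    have h3c : 3 + c < ns.length := by
      have h1 : 1 ≤ pvNRows (w :: rest) := by simp [pvNRows]
      omega
    have hmod1 : ¬(4 * (c : Int) + 1 ≠ 0 ∧ PySem.Int.mod (4 * (c : Int) + 1) 4 = 0) := by
      rw [PySem.Int.mod_eq_emod_of_pos (by norm_num)]; omega
    have hmod2 : ¬(4 * (c : Int) + 1 + 1 ≠ 0 ∧ PySem.Int.mod (4 * (c : Int) + 1 + 1) 4 = 0) := by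
      rw [PySem.Int.mod_eq_emod_of_pos (by norm_num)]; omega
    have hmod3 : ¬(4 * (c : Int) + 1 + 1 + 1 ≠ 0 ∧ PySem.Int.mod (4 * (c : Int) + 1 + 1 + 1) 4 = 0) := by
      rw [PySem.Int.mod_eq_emod_of_pos (by norm_num)]; omega
    have hmod4 : (4 * (c : Int) + 1 + 1 + 1 + 1 ≠ 0 ∧ PySem.Int.mod (4 * (c : Int) + 1 + 1 + 1 + 1) 4 = 0) := by
      constructor
      · omega
      · rw [PySem.Int.mod_eq_emod_of_pos (by norm_num)]; omega
    match rest with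
    | [] =>
      have hnr : pvNRows [w] = 1 := by norm_num [pvNRows]
      rw [pvLoopA, pv_finish ns (3 + c) h3c]
      rw [pvRowsB]
      simp only [List.take_nil, List.drop_nil, pvRowsB, hnr]
      rw [List.set_eq_take_cons_drop _ h3c]
      simp only [List.cons_append, List.nil_append, List.append_assoc]
      refine congrArg (fun t => ns.take (3 + c) ++ t) ?_
      refine congrArg (fun s => s :: ns.drop (3 + c + 1)) ?_
      rw [← String.toList_inj]
      simp [PySem.Str.toList_join, PySem.Chars.join_singleton, pv_tl2n, pv_tln,
            PySem.List.enumerate_cons, PySem.List.enumerate_nil]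
    | [a] =>
      have hnr : pvNRows [w, a] = 1 := by norm_num [pvNRows]
      rw [pvLoopA, if_neg hmod1]
      simp only [pv_write ns (3 + c) h3c
        (PySem.Str.slice (ns.getD (3 + c) "") none (some (-2)) ++ pvEntry (4 * (c : Int)) w maxlen)
        (pvEntry (4 * (c : Int) + 1) a maxlen)]
      rw [pvLoopA, pv_finish ns (3 + c) h3c]
      rw [pvRowsB]
      simp only [List.take_succ_cons, List.take_nil, List.drop_succ_cons, List.drop_nil, pvRowsB, hnr]
      rw [List.set_eq_take_cons_drop _ h3c]
      simp only [List.cons_append, List.nil_append, List.append_assoc]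
      refine congrArg (fun t => ns.take (3 + c) ++ t) ?_
      refine congrArg (fun s => s :: ns.drop (3 + c + 1)) ?_
      rw [← String.toList_inj]
      simp [PySem.Str.toList_join, PySem.Chars.join_cons_cons, PySem.Chars.join_singleton,
            pv_tl2n, pv_tln, PySem.List.enumerate_cons, PySem.List.enumerate_nil]
    | [a, b] =>
      have hnr : pvNRows [w, a, b] = 1 := by norm_num [pvNRows]
      rw [pvLoopA, if_neg hmod1]
      simp only [pv_write ns (3 + c) h3c
        (PySem.Str.slice (ns.getD (3 + c) "") none (some (-2)) ++ pvEntry (4 * (c : Int)) w maxlen)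
        (pvEntry (4 * (c : Int) + 1) a maxlen)]
      rw [pvLoopA, if_neg hmod2]
      simp only [pv_write ns (3 + c) h3c
        (PySem.Str.slice (ns.getD (3 + c) "") none (some (-2)) ++ pvEntry (4 * (c : Int)) w maxlen ++
          pvEntry (4 * (c : Int) + 1) a maxlen)
        (pvEntry (4 * (c : Int) + 1 + 1) b maxlen)]
      rw [pvLoopA, pv_finish ns (3 + c) h3c]
      rw [pvRowsB]
      simp only [List.take_succ_cons, List.take_nil, List.drop_succ_cons, List.drop_nil, pvRowsB, hnr]
      rw [List.set_eq_take_cons_drop _ h3c]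
      simp only [List.cons_append, List.nil_append, List.append_assoc]
      refine congrArg (fun t => ns.take (3 + c) ++ t) ?_
      refine congrArg (fun s => s :: ns.drop (3 + c + 1)) ?_
      rw [← String.toList_inj]
      simp [PySem.Str.toList_join, PySem.Chars.join_cons_cons, PySem.Chars.join_singleton,
            pv_tl2n, pv_tln, PySem.List.enumerate_cons, PySem.List.enumerate_nil]
    | [a, b, d] =>
      have hnr : pvNRows [w, a, b, d] = 1 := by norm_num [pvNRows]
      rw [pvLoopA, if_neg hmod1]
      simp only [pv_write ns (3 + c) h3c
        (PySem.Str.slice (ns.getD (3 + c) "") none (some (-2)) ++ pvEntry (4 * (c : Int)) w maxlen)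
        (pvEntry (4 * (c : Int) + 1) a maxlen)]
      rw [pvLoopA, if_neg hmod2]
      simp only [pv_write ns (3 + c) h3c
        (PySem.Str.slice (ns.getD (3 + c) "") none (some (-2)) ++ pvEntry (4 * (c : Int)) w maxlen ++
          pvEntry (4 * (c : Int) + 1) a maxlen)
        (pvEntry (4 * (c : Int) + 1 + 1) b maxlen)]
      rw [pvLoopA, if_neg hmod3]
      simp only [pv_write ns (3 + c) h3c
        (PySem.Str.slice (ns.getD (3 + c) "") none (some (-2)) ++ pvEntry (4 * (c : Int)) w maxlen ++
          pvEntry (4 * (c : Int) + 1) a maxlen ++ pvEntry (4 * (c : Int) + 1 + 1) b maxlen)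
        (pvEntry (4 * (c : Int) + 1 + 1 + 1) d maxlen)]
      rw [pvLoopA, pv_finish ns (3 + c) h3c]
      rw [pvRowsB]
      simp only [List.take_succ_cons, List.take_nil, List.drop_succ_cons, List.drop_nil, pvRowsB, hnr]
      rw [List.set_eq_take_cons_drop _ h3c]
      simp only [List.cons_append, List.nil_append, List.append_assoc]
      refine congrArg (fun t => ns.take (3 + c) ++ t) ?_
      refine congrArg (fun s => s :: ns.drop (3 + c + 1)) ?_
      rw [← String.toList_inj]
      simp [PySem.Str.toList_join, PySem.Chars.join_cons_cons, PySem.Chars.join_singleton,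
            pv_tl2n, pv_tln, PySem.List.enumerate_cons, PySem.List.enumerate_nil]
    | a :: b :: d :: e :: rest' =>
      -- one full chunk, then the newline branch fires and we recurse on the remaining chunks
      rw [pvLoopA, if_neg hmod1]
      simp only [pv_write ns (3 + c) h3c
        (PySem.Str.slice (ns.getD (3 + c) "") none (some (-2)) ++ pvEntry (4 * (c : Int)) w maxlen)
        (pvEntry (4 * (c : Int) + 1) a maxlen)]
      rw [pvLoopA, if_neg hmod2]
      simp only [pv_write ns (3 + c) h3c
        (PySem.Str.slice (ns.getD (3 + c) "") none (some (-2)) ++ pvEntry (4 * (c : Int)) w maxlen ++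
          pvEntry (4 * (c : Int) + 1) a maxlen)
        (pvEntry (4 * (c : Int) + 1 + 1) b maxlen)]
      rw [pvLoopA, if_neg hmod3]
      simp only [pv_write ns (3 + c) h3c
        (PySem.Str.slice (ns.getD (3 + c) "") none (some (-2)) ++ pvEntry (4 * (c : Int)) w maxlen ++
          pvEntry (4 * (c : Int) + 1) a maxlen ++ pvEntry (4 * (c : Int) + 1 + 1) b maxlen)
        (pvEntry (4 * (c : Int) + 1 + 1 + 1) d maxlen)]
      rw [pvLoopA, if_pos hmod4]
      simp only [pv_getD_set ns (3 + c) h3c, List.set_set,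
                 pv_getD_set_ne ns (3 + c) (3 + c + 1) (by omega)]
      have hIH := ih (e :: rest').length (by simp [← hm]) e rest' (c + 1)
        (ns.set (3 + c)
          (PySem.Str.slice (ns.getD (3 + c) "") none (some (-2)) ++ pvEntry (4 * (c : Int)) w maxlen ++
            pvEntry (4 * (c : Int) + 1) a maxlen ++ pvEntry (4 * (c : Int) + 1 + 1) b maxlen ++
            pvEntry (4 * (c : Int) + 1 + 1 + 1) d maxlen ++ "  " ++ "\n")) rfl
        (by
          simp only [List.length_set, pvNRows, List.length_cons] at hlen ⊢
          omega)
      have g1 : ((c + 1 : Nat) : Int) = (c : Int) + 1 := by push_cast; ring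
      rw [g1] at hIH
      rw [show (4 : Int) * ((c : Int) + 1) + 1 = 4 * (c : Int) + 1 + 1 + 1 + 1 + 1 by ring] at hIH
      rw [show (4 : Int) * ((c : Int) + 1) = 4 * (c : Int) + 1 + 1 + 1 + 1 by ring] at hIH
      rw [show 3 + (c + 1) = 3 + c + 1 from rfl] at hIH
      rw [pv_getD_set_ne ns (3 + c) (3 + c + 1) (by omega)] at hIH
      rw [hIH]
      rw [pv_rowsB_congr maxlen (e :: rest').length (e :: rest') rfl (c + 1)
            (4 * (c : Int) + 1 + 1 + 1 + 1) ns _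
            (fun k hk => pv_getD_set_ne ns (3 + c) (3 + k) (by omega) _)]
      rw [pv_take_set ns (3 + c) h3c]
      rw [pv_drop_set ns (3 + c) _ (by omega)]
      conv_rhs => rw [pvRowsB]
      simp only [List.take_succ_cons, List.take_zero, List.drop_succ_cons, List.drop_zero]
      rw [show (4 : Int) * (c : Int) + 4 = 4 * (c : Int) + 1 + 1 + 1 + 1 by ring]
      have hnr : 3 + c + pvNRows (w :: a :: b :: d :: e :: rest') = 3 + c + 1 + pvNRows (e :: rest') := by
        simp only [pvNRows, List.length_cons]
        omega
      rw [hnr]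
      simp only [List.cons_append, List.nil_append, List.append_assoc]
      refine congrArg (fun t => ns.take (3 + c) ++ t) ?_
      refine congrArg (fun s => s :: (pvRowsB ns maxlen (c + 1) (4 * (c : Int) + 1 + 1 + 1 + 1) (e :: rest') ++ ns.drop (3 + c + 1 + pvNRows (e :: rest')))) ?_
      rw [← String.toList_inj]
      simp [PySem.Str.toList_join, PySem.Chars.join_cons_cons, PySem.Chars.join_singleton,
            pv_tl2n, pv_tln, PySem.List.enumerate_cons, PySem.List.enumerate_nil]

-- ===== VERDICT (by name: the statement is the Claim_ definition above) =====
theorem make_output_sample_spec : Claim_equal_make_output_sample := by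
  intro sample found_words hdom hpre
  unfold Spec_make_output_sample
  match found_words with
  | [] => simp [make_output_sample, make_output_sample_alt]
  | w :: rest =>
    have hpre' : 3 + ((w :: rest).length - 1) / 4 < sample.length := by
      rcases hpre with h | h
      · exact absurd h (by simp)
      · exact h
    have hb : 3 + 0 + pvNRows (w :: rest) ≤ sample.length := by
      simp only [pvNRows]; omega
    have hb0 : ¬(((0 : Int)) ≠ 0 ∧ PySem.Int.mod (0 : Int) 4 = 0) := by simp
    have H := pv_main (PySem.Str.len ((PySem.List.max? (w :: rest) PySem.Str.len).getD ""))
      (w :: rest).length w rest 0 sample rfl hb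
    simp only [make_output_sample, make_output_sample_alt, List.isEmpty_cons,
               Bool.false_eq_true, if_false]
    show pvFinal (pvLoopA (PySem.Str.len ((PySem.List.max? (w :: rest) PySem.Str.len).getD ""))
        (w :: rest) 0 sample 3) = _
    rw [pvLoopA, if_neg hb0]
    simp only [Nat.cast_zero, mul_zero, zero_add, Nat.add_zero] at H
    simp only []
    rw [show (0 : Int) + 1 = 1 from by norm_num]
    rw [pv_maxlen_eq w rest] at H ⊢
    rw [pv_rowsB_length _ (w :: rest).length _ rfl (by simp) sample 0 0]
    exact H
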